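-- pv_equiv track=rewrite | github.com/kvb1201/AI-202 | lab-7/q2.py | best_neighbor
-- ===== SOURCE A (Python) =====
-- N = 8
--
-- def heuristic(board):
--     h = 0
--     for i in range(N):
--         for j in range(i + 1, N):
--             if board[i] == board[j]:
--                 h += 1
--             if abs(board[i] - board[j]) == abs(i - j):
--                 h += 1
--     return h
--
-- def best_neighbor(board):
--     best = board[:]
--     best_h = heuristic(board)
--
--     for col in range(N):
--         orig = board[col]
--         for row in range(N):
--             if row == orig:
--                 continue
--             board[col] = row
--             h = heuristic(board)
--             if h < best_h:
--                 best_h = h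
--                 best = board[:]
--         board[col] = orig
--
--     return best, best_h
-- ===== SOURCE B (Python) =====
-- N = 8
--
-- def _conflict(r1, c1, r2, c2):
--     return (r1 == r2) + (abs(r1 - r2) == abs(c1 - c2))
--
-- def _col_contrib(board, col, row):
--     s = 0
--     for j in range(N):
--         if j != col:
--             s += _conflict(row, col, board[j], j)
--     return s
--
-- def _base(board):
--     s = 0
--     for i in range(N):
--         for j in range(i + 1, N):
--             s += _conflict(board[i], i, board[j], j)
--     return s
--
-- def best_neighbor(board):
--     base = _base(board)
--     best = board[:]
--     best_h = base
--     for col in range(N):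
--         orig = board[col]
--         cur = _col_contrib(board, col, orig)
--         for row in range(N):
--             if row == orig:
--                 continue
--             h = base - cur + _col_contrib(board, col, row)
--             if h < best_h:
--                 best_h = h
--                 best = board[:col] + [row] + board[col + 1:]
--     return best, best_h
-- ===== Notes on version B (the rewrite author's own statement) =====
-- stated objective: faster
-- what changed: B computes the board's heuristic once and scores each candidate move by delta evaluation (base minus the moved column's old conflict contribution plus its new one, O(N) per move) instead of recomputing the full O(N^2) pairwise heuristic for every one of the 64 candidate boards; B also never mutates the argument list, while A mutates it in place and restores it.
import Mathlib
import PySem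

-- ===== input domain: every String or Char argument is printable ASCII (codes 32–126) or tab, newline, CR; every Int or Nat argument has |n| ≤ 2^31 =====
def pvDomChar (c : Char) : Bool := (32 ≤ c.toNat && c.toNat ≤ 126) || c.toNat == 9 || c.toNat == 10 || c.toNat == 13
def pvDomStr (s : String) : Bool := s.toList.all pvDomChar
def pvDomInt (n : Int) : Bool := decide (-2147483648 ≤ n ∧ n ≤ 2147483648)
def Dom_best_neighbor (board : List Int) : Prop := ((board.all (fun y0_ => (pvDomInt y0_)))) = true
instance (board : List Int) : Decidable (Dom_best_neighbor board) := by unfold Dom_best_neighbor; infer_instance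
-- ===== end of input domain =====

-- B computes each candidate's heuristic by delta evaluation (base heuristic adjusted by one
-- column's conflict contribution) instead of recomputing the full pairwise heuristic per move.
-- A mutates its argument in place during the scan but restores it before returning; the
-- equivalence proved here is about the return value (B never mutates).

-- ===== PORT A =====
-- helper `heuristic` of A: full pairwise conflict count over the first 8 columns
def heuristic (board : List Int) : Int :=
  (PySem.List.pyRange 0 8 1).foldl (fun h i =>
    (PySem.List.pyRange (i+1) 8 1).foldl (fun h j =>
      let h := if PySem.List.pyGetD board i 0 = PySem.List.pyGetD board j 0 then h + 1 else h
      if (PySem.List.pyGetD board i 0 - PySem.List.pyGetD board j 0).natAbs = (i - j).natAbs then h + 1 else h)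
      h) 0

-- the mutable python list `board` is threaded through the fold state (A restores it at the end
-- of every column, so the net mutation is nil); pyGetD/pySetD are exact under Pre_ (length ≥ 8)
def best_neighbor (board : List Int) : List Int × Int :=
  let best := PySem.List.slice board none none
  let best_h := heuristic board
  let st := (PySem.List.pyRange 0 8 1).foldl (fun (st : List Int × List Int × Int) col =>
      let orig := PySem.List.pyGetD st.1 col 0
      let st2 := (PySem.List.pyRange 0 8 1).foldl (fun (st : List Int × List Int × Int) row =>
          if row = orig then st
          else
            let bd := PySem.List.pySetD st.1 col row
            let h := heuristic bd
            (bd, if h < st.2.2 then (PySem.List.slice bd none none, h) else (st.2.1, st.2.2))) st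
      (PySem.List.pySetD st2.1 col orig, st2.2))
    (board, best, best_h)
  (st.2.1, st.2.2)

-- ===== PORT B =====
-- helper `_conflict` of B: conflicts between queens (r1 in column c1) and (r2 in column c2)
def pvConflict (r1 c1 r2 c2 : Int) : Int :=
  (if r1 = r2 then 1 else 0) + (if (r1 - r2).natAbs = (c1 - c2).natAbs then 1 else 0)

-- helper `_col_contrib` of B: conflicts of column `col` holding `row` against all other columns
def pvColContrib (board : List Int) (col row : Int) : Int :=
  (PySem.List.pyRange 0 8 1).foldl (fun s j =>
    if j ≠ col then s + pvConflict row col (PySem.List.pyGetD board j 0) j else s) 0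

-- helper `_base` of B: the full heuristic, computed once as a sum of pair conflicts
def pvBase (board : List Int) : Int :=
  (PySem.List.pyRange 0 8 1).foldl (fun s i =>
    (PySem.List.pyRange (i+1) 8 1).foldl (fun s j =>
      s + pvConflict (PySem.List.pyGetD board i 0) i (PySem.List.pyGetD board j 0) j) s) 0

def best_neighbor_alt (board : List Int) : List Int × Int :=
  let base := pvBase board
  (PySem.List.pyRange 0 8 1).foldl (fun (st : List Int × Int) col =>
      let orig := PySem.List.pyGetD board col 0
      let cur := pvColContrib board col orig
      (PySem.List.pyRange 0 8 1).foldl (fun (st : List Int × Int) row =>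
          if row = orig then st
          else
            let h := base - cur + pvColContrib board col row
            if h < st.2 then
              (PySem.List.slice board none (some col) ++ [row] ++ PySem.List.slice board (some (col + 1)) none, h)
            else st) st)
    (PySem.List.slice board none none, base)

-- ===== PRECONDITION & SPEC =====
-- A indexes board[0..7]; on boards shorter than 8 the Python raises IndexError.
def Pre_best_neighbor (board : List Int) : Prop := 8 ≤ board.length
instance (board : List Int) : Decidable (Pre_best_neighbor board) := by unfold Pre_best_neighbor; infer_instance
def pvWitness_best_neighbor : List Int := [0, 1, 2, 3, 4, 5, 6, 7]
def Spec_best_neighbor (board : List Int) (out : List Int × Int) : Prop := out = best_neighbor_alt board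
instance (board : List Int) (out : List Int × Int) : Decidable (Spec_best_neighbor board out) := by unfold Spec_best_neighbor; infer_instance

-- ===== CLAIM (what is proved, stated in full; the proofs are below) =====
def Claim_equal_best_neighbor : Prop := ∀ (board : List Int), Dom_best_neighbor board → Pre_best_neighbor board → Spec_best_neighbor board (best_neighbor board)

-- ===== LEMMAS AND PROOFS =====

theorem pvConflict_comm (a i b j : Int) : pvConflict a i b j = pvConflict b j a i := by
  unfold pvConflict
  split_ifs <;> omega

-- A's two sequential `if` increments are the same as adding B's `_conflict`
theorem heu_eq_base (b : List Int) : heuristic b = pvBase b := by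
  unfold heuristic pvBase
  have h1 : ∀ i : Int,
      (fun (h : Int) (j : Int) =>
        let h := if PySem.List.pyGetD b i 0 = PySem.List.pyGetD b j 0 then h + 1 else h
        if (PySem.List.pyGetD b i 0 - PySem.List.pyGetD b j 0).natAbs = (i - j).natAbs then h + 1 else h)
      = (fun (s : Int) (j : Int) =>
        s + pvConflict (PySem.List.pyGetD b i 0) i (PySem.List.pyGetD b j 0) j) := by
    intro i
    funext h j
    dsimp only [pvConflict]
    split_ifs <;> ring
  have h2 :
      (fun (h : Int) (i : Int) =>
        (PySem.List.pyRange (i+1) 8 1).foldl (fun (h : Int) (j : Int) =>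
          let h := if PySem.List.pyGetD b i 0 = PySem.List.pyGetD b j 0 then h + 1 else h
          if (PySem.List.pyGetD b i 0 - PySem.List.pyGetD b j 0).natAbs = (i - j).natAbs then h + 1 else h) h)
      = (fun (s : Int) (i : Int) =>
        (PySem.List.pyRange (i+1) 8 1).foldl (fun (s : Int) (j : Int) =>
          s + pvConflict (PySem.List.pyGetD b i 0) i (PySem.List.pyGetD b j 0) j) s) := by
    funext h i
    rw [h1 i]
  rw [h2]

theorem pvGet_0 (a0 : Int) (l : List Int) : PySem.List.pyGetD (a0::l) 0 0 = a0 := by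
  simp [PySem.List.pyGetD_ofNat']

theorem pvGet_1 (a0 a1 : Int) (l : List Int) : PySem.List.pyGetD (a0::a1::l) 1 0 = a1 := by
  simp [PySem.List.pyGetD_ofNat']

theorem pvGet_2 (a0 a1 a2 : Int) (l : List Int) : PySem.List.pyGetD (a0::a1::a2::l) 2 0 = a2 := by
  simp [PySem.List.pyGetD_ofNat']

theorem pvGet_3 (a0 a1 a2 a3 : Int) (l : List Int) : PySem.List.pyGetD (a0::a1::a2::a3::l) 3 0 = a3 := by
  simp [PySem.List.pyGetD_ofNat']

theorem pvGet_4 (a0 a1 a2 a3 a4 : Int) (l : List Int) : PySem.List.pyGetD (a0::a1::a2::a3::a4::l) 4 0 = a4 := by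
  simp [PySem.List.pyGetD_ofNat']

theorem pvGet_5 (a0 a1 a2 a3 a4 a5 : Int) (l : List Int) : PySem.List.pyGetD (a0::a1::a2::a3::a4::a5::l) 5 0 = a5 := by
  simp [PySem.List.pyGetD_ofNat']

theorem pvGet_6 (a0 a1 a2 a3 a4 a5 a6 : Int) (l : List Int) : PySem.List.pyGetD (a0::a1::a2::a3::a4::a5::a6::l) 6 0 = a6 := by
  simp [PySem.List.pyGetD_ofNat']

theorem pvGet_7 (a0 a1 a2 a3 a4 a5 a6 a7 : Int) (l : List Int) : PySem.List.pyGetD (a0::a1::a2::a3::a4::a5::a6::a7::l) 7 0 = a7 := by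
  simp [PySem.List.pyGetD_ofNat']

-- pvBase written out over the 28 column pairs
theorem pvBase8 (l : List Int) : pvBase l =
      pvConflict (PySem.List.pyGetD l 0 0) 0 (PySem.List.pyGetD l 1 0) 1
      + pvConflict (PySem.List.pyGetD l 0 0) 0 (PySem.List.pyGetD l 2 0) 2
      + pvConflict (PySem.List.pyGetD l 0 0) 0 (PySem.List.pyGetD l 3 0) 3
      + pvConflict (PySem.List.pyGetD l 0 0) 0 (PySem.List.pyGetD l 4 0) 4
      + pvConflict (PySem.List.pyGetD l 0 0) 0 (PySem.List.pyGetD l 5 0) 5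
      + pvConflict (PySem.List.pyGetD l 0 0) 0 (PySem.List.pyGetD l 6 0) 6
      + pvConflict (PySem.List.pyGetD l 0 0) 0 (PySem.List.pyGetD l 7 0) 7
      + pvConflict (PySem.List.pyGetD l 1 0) 1 (PySem.List.pyGetD l 2 0) 2
      + pvConflict (PySem.List.pyGetD l 1 0) 1 (PySem.List.pyGetD l 3 0) 3
      + pvConflict (PySem.List.pyGetD l 1 0) 1 (PySem.List.pyGetD l 4 0) 4
      + pvConflict (PySem.List.pyGetD l 1 0) 1 (PySem.List.pyGetD l 5 0) 5
      + pvConflict (PySem.List.pyGetD l 1 0) 1 (PySem.List.pyGetD l 6 0) 6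
      + pvConflict (PySem.List.pyGetD l 1 0) 1 (PySem.List.pyGetD l 7 0) 7
      + pvConflict (PySem.List.pyGetD l 2 0) 2 (PySem.List.pyGetD l 3 0) 3
      + pvConflict (PySem.List.pyGetD l 2 0) 2 (PySem.List.pyGetD l 4 0) 4
      + pvConflict (PySem.List.pyGetD l 2 0) 2 (PySem.List.pyGetD l 5 0) 5
      + pvConflict (PySem.List.pyGetD l 2 0) 2 (PySem.List.pyGetD l 6 0) 6
      + pvConflict (PySem.List.pyGetD l 2 0) 2 (PySem.List.pyGetD l 7 0) 7
      + pvConflict (PySem.List.pyGetD l 3 0) 3 (PySem.List.pyGetD l 4 0) 4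
      + pvConflict (PySem.List.pyGetD l 3 0) 3 (PySem.List.pyGetD l 5 0) 5
      + pvConflict (PySem.List.pyGetD l 3 0) 3 (PySem.List.pyGetD l 6 0) 6
      + pvConflict (PySem.List.pyGetD l 3 0) 3 (PySem.List.pyGetD l 7 0) 7
      + pvConflict (PySem.List.pyGetD l 4 0) 4 (PySem.List.pyGetD l 5 0) 5
      + pvConflict (PySem.List.pyGetD l 4 0) 4 (PySem.List.pyGetD l 6 0) 6
      + pvConflict (PySem.List.pyGetD l 4 0) 4 (PySem.List.pyGetD l 7 0) 7
      + pvConflict (PySem.List.pyGetD l 5 0) 5 (PySem.List.pyGetD l 6 0) 6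
      + pvConflict (PySem.List.pyGetD l 5 0) 5 (PySem.List.pyGetD l 7 0) 7
      + pvConflict (PySem.List.pyGetD l 6 0) 6 (PySem.List.pyGetD l 7 0) 7 := by
  simp only [pvBase,
    show PySem.List.pyRange 0 8 1 = [0,1,2,3,4,5,6,7] from by decide,
    show PySem.List.pyRange (0+1) 8 1 = [1,2,3,4,5,6,7] from by decide,
    show PySem.List.pyRange (1+1) 8 1 = [2,3,4,5,6,7] from by decide,
    show PySem.List.pyRange (2+1) 8 1 = [3,4,5,6,7] from by decide,
    show PySem.List.pyRange (3+1) 8 1 = [4,5,6,7] from by decide,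
    show PySem.List.pyRange (4+1) 8 1 = [5,6,7] from by decide,
    show PySem.List.pyRange (5+1) 8 1 = [6,7] from by decide,
    show PySem.List.pyRange (6+1) 8 1 = [7] from by decide,
    show PySem.List.pyRange (7+1) 8 1 = ([] : List Int) from by decide,
    List.foldl]
  ring

-- delta evaluation: moving column `col` to `row` changes the heuristic by that column's contribution
theorem pvDelta (b0 b1 b2 b3 b4 b5 b6 b7 : Int) (rest : List Int) (col : Int)
    (hc0 : 0 ≤ col) (hc8 : col < 8) (row : Int) :
    pvBase ((b0::b1::b2::b3::b4::b5::b6::b7::rest).set col.toNat row)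
      = pvBase (b0::b1::b2::b3::b4::b5::b6::b7::rest)
        - pvColContrib (b0::b1::b2::b3::b4::b5::b6::b7::rest) col (PySem.List.pyGetD (b0::b1::b2::b3::b4::b5::b6::b7::rest) col 0)
        + pvColContrib (b0::b1::b2::b3::b4::b5::b6::b7::rest) col row := by
  interval_cases col <;>
  · simp only [show ((0:Int).toNat) = 0 from rfl, show ((1:Int).toNat) = 1 from rfl, show ((2:Int).toNat) = 2 from rfl, show ((3:Int).toNat) = 3 from rfl, show ((4:Int).toNat) = 4 from rfl, show ((5:Int).toNat) = 5 from rfl, show ((6:Int).toNat) = 6 from rfl, show ((7:Int).toNat) = 7 from rfl]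
    norm_num [List.set]
    simp only [pvBase8, pvColContrib,
      show PySem.List.pyRange 0 8 1 = [0,1,2,3,4,5,6,7] from by decide, List.foldl]
    norm_num [pvGet_0, pvGet_1, pvGet_2, pvGet_3, pvGet_4, pvGet_5, pvGet_6, pvGet_7]
    simp only [pvConflict_comm]
    ring

-- simulation of a fold that threads the mutable board against one that does not
theorem pvFoldlSim {σ : Type} (P : List Int → Prop)
    (f : (List Int × σ) → Int → (List Int × σ)) (g : σ → Int → σ) :
    ∀ (rows : List Int),
      (∀ t r, r ∈ rows → P t.1 → P ((f t r).1) ∧ (f t r).2 = g t.2 r) →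
    ∀ t : List Int × σ, P t.1 → P ((rows.foldl f t).1) ∧ (rows.foldl f t).2 = rows.foldl g t.2 := by
  intro rows
  induction rows with
  | nil => intro _ t hP; exact ⟨hP, rfl⟩
  | cons r rs ih =>
    intro hstep t hP
    simp only [List.foldl_cons]
    have h1 := hstep t r List.mem_cons_self hP
    have h2 : f t r = ((f t r).1, g t.2 r) := by rw [← h1.2]
    rw [h2]
    exact ih (fun t' r' hr' => hstep t' r' (List.mem_cons_of_mem _ hr')) ((f t r).1, g t.2 r) h1.1

-- ===== VERDICT (by name: the statement is the Claim_ definition above) =====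
set_option maxHeartbeats 4000000 in
set_option maxRecDepth 8192 in
theorem best_neighbor_spec : Claim_equal_best_neighbor := by
  intro board hdom hpre
  unfold Pre_best_neighbor at hpre
  unfold Spec_best_neighbor
  rcases board with _ | ⟨b0, _ | ⟨b1, _ | ⟨b2, _ | ⟨b3, _ | ⟨b4, _ | ⟨b5, _ | ⟨b6, _ | ⟨b7, rest⟩⟩⟩⟩⟩⟩⟩⟩ <;>
    simp only [List.length_nil, List.length_cons] at hpre <;> try omega
  clear hpre hdom
  have hstep : ∀ (t : List Int × List Int × Int) (c : Int), c ∈ PySem.List.pyRange 0 8 1 →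
      t.1 = (b0::b1::b2::b3::b4::b5::b6::b7::rest) →
      (((fun (st : List Int × List Int × Int) col =>
      let orig := PySem.List.pyGetD st.1 col 0
      let st2 := (PySem.List.pyRange 0 8 1).foldl (fun (st : List Int × List Int × Int) row =>
          if row = orig then st
          else
            let bd := PySem.List.pySetD st.1 col row
            let h := heuristic bd
            (bd, if h < st.2.2 then (PySem.List.slice bd none none, h) else (st.2.1, st.2.2))) st
      (PySem.List.pySetD st2.1 col orig, st2.2)) t c).1 = (b0::b1::b2::b3::b4::b5::b6::b7::rest)) ∧ (((fun (st : List Int × List Int × Int) col =>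
      let orig := PySem.List.pyGetD st.1 col 0
      let st2 := (PySem.List.pyRange 0 8 1).foldl (fun (st : List Int × List Int × Int) row =>
          if row = orig then st
          else
            let bd := PySem.List.pySetD st.1 col row
            let h := heuristic bd
            (bd, if h < st.2.2 then (PySem.List.slice bd none none, h) else (st.2.1, st.2.2))) st
      (PySem.List.pySetD st2.1 col orig, st2.2)) t c).2 = (fun (st : List Int × Int) col =>
      let orig := PySem.List.pyGetD (b0::b1::b2::b3::b4::b5::b6::b7::rest) col 0
      let cur := pvColContrib (b0::b1::b2::b3::b4::b5::b6::b7::rest) col orig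
      (PySem.List.pyRange 0 8 1).foldl (fun (st : List Int × Int) row =>
          if row = orig then st
          else
            let h := pvBase (b0::b1::b2::b3::b4::b5::b6::b7::rest) - cur + pvColContrib (b0::b1::b2::b3::b4::b5::b6::b7::rest) col row
            if h < st.2 then
              (PySem.List.slice (b0::b1::b2::b3::b4::b5::b6::b7::rest) none (some col) ++ [row] ++ PySem.List.slice (b0::b1::b2::b3::b4::b5::b6::b7::rest) (some (col + 1)) none, h)
            else st) st) t.2 c) := by
    intro t c hc hbd
    obtain ⟨bd, s⟩ := t
    dsimp only at hbd ⊢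
    subst hbd
    obtain ⟨hc0, hc8⟩ := (PySem.List.mem_pyRange_one).1 hc
    have hcN : c.toNat < (b0::b1::b2::b3::b4::b5::b6::b7::rest).length := by
      simp only [List.length_cons]; omega
    have hP0 : ∀ r : Int, PySem.List.pySetD (b0::b1::b2::b3::b4::b5::b6::b7::rest) c r = (b0::b1::b2::b3::b4::b5::b6::b7::rest).set c.toNat r := by
      intro r; rw [PySem.List.pySetD_of_nonneg _ _ hc0]
    have hcopy : ∀ r : Int, (b0::b1::b2::b3::b4::b5::b6::b7::rest).set c.toNat r
        = PySem.List.slice (b0::b1::b2::b3::b4::b5::b6::b7::rest) none (some c) ++ [r] ++ PySem.List.slice (b0::b1::b2::b3::b4::b5::b6::b7::rest) (some (c + 1)) none := by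
      intro r
      rw [PySem.List.slice_to _ hc0, PySem.List.slice_from _ (by omega : (0:Int) ≤ c + 1),
        show (c + 1).toNat = c.toNat + 1 from by omega,
        List.set_eq_take_cons_drop _ hcN]
      simp
    have hstepIn : ∀ (t' : List Int × List Int × Int) (r : Int), r ∈ PySem.List.pyRange 0 8 1 →
        (∀ x : Int, PySem.List.pySetD t'.1 c x = (b0::b1::b2::b3::b4::b5::b6::b7::rest).set c.toNat x) →
        (∀ x : Int, PySem.List.pySetD (((fun (st : List Int × List Int × Int) row =>
        if row = PySem.List.pyGetD (b0::b1::b2::b3::b4::b5::b6::b7::rest) c 0 then st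
        else
          let bd := PySem.List.pySetD st.1 c row
          let h := heuristic bd
          (bd, if h < st.2.2 then (PySem.List.slice bd none none, h) else (st.2.1, st.2.2))) t' r).1) c x = (b0::b1::b2::b3::b4::b5::b6::b7::rest).set c.toNat x) ∧
        (((fun (st : List Int × List Int × Int) row =>
        if row = PySem.List.pyGetD (b0::b1::b2::b3::b4::b5::b6::b7::rest) c 0 then st
        else
          let bd := PySem.List.pySetD st.1 c row
          let h := heuristic bd
          (bd, if h < st.2.2 then (PySem.List.slice bd none none, h) else (st.2.1, st.2.2))) t' r).2 = (fun (st : List Int × Int) row =>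
        if row = PySem.List.pyGetD (b0::b1::b2::b3::b4::b5::b6::b7::rest) c 0 then st
        else
          let h := pvBase (b0::b1::b2::b3::b4::b5::b6::b7::rest) - pvColContrib (b0::b1::b2::b3::b4::b5::b6::b7::rest) c (PySem.List.pyGetD (b0::b1::b2::b3::b4::b5::b6::b7::rest) c 0) + pvColContrib (b0::b1::b2::b3::b4::b5::b6::b7::rest) c row
          if h < st.2 then
            (PySem.List.slice (b0::b1::b2::b3::b4::b5::b6::b7::rest) none (some c) ++ [row] ++ PySem.List.slice (b0::b1::b2::b3::b4::b5::b6::b7::rest) (some (c + 1)) none, h)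
          else st) t'.2 r) := by
      intro t' r hr hP
      obtain ⟨bd, s'⟩ := t'
      dsimp only at hP ⊢
      by_cases hro : r = PySem.List.pyGetD (b0::b1::b2::b3::b4::b5::b6::b7::rest) c 0
      · constructor
        · intro x; rw [if_pos hro]; exact hP x
        · rw [if_pos hro, if_pos hro]
      · constructor
        · intro x; rw [if_neg hro]
          dsimp only
          rw [hP r, PySem.List.pySetD_of_nonneg _ _ hc0, List.set_set]
        · rw [if_neg hro, if_neg hro]
          dsimp only
          rw [hP r, heu_eq_base, pvDelta b0 b1 b2 b3 b4 b5 b6 b7 rest c hc0 hc8 r,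
            PySem.List.slice_none_none, hcopy r]
    have hinner := pvFoldlSim
      (fun bd => ∀ x : Int, PySem.List.pySetD bd c x = (b0::b1::b2::b3::b4::b5::b6::b7::rest).set c.toNat x)
      (fun (st : List Int × List Int × Int) row =>
        if row = PySem.List.pyGetD (b0::b1::b2::b3::b4::b5::b6::b7::rest) c 0 then st
        else
          let bd := PySem.List.pySetD st.1 c row
          let h := heuristic bd
          (bd, if h < st.2.2 then (PySem.List.slice bd none none, h) else (st.2.1, st.2.2))) (fun (st : List Int × Int) row =>
        if row = PySem.List.pyGetD (b0::b1::b2::b3::b4::b5::b6::b7::rest) c 0 then st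
        else
          let h := pvBase (b0::b1::b2::b3::b4::b5::b6::b7::rest) - pvColContrib (b0::b1::b2::b3::b4::b5::b6::b7::rest) c (PySem.List.pyGetD (b0::b1::b2::b3::b4::b5::b6::b7::rest) c 0) + pvColContrib (b0::b1::b2::b3::b4::b5::b6::b7::rest) c row
          if h < st.2 then
            (PySem.List.slice (b0::b1::b2::b3::b4::b5::b6::b7::rest) none (some c) ++ [row] ++ PySem.List.slice (b0::b1::b2::b3::b4::b5::b6::b7::rest) (some (c + 1)) none, h)
          else st) (PySem.List.pyRange 0 8 1) hstepIn ((b0::b1::b2::b3::b4::b5::b6::b7::rest), s) hP0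
    constructor
    · dsimp only
      rw [hinner.1 (PySem.List.pyGetD (b0::b1::b2::b3::b4::b5::b6::b7::rest) c 0)]
      rw [PySem.List.pyGetD_eq_getElem _ 0 hc0 (by simp only [List.length_cons]; push_cast; omega)]
      exact List.set_getElem_self ..
    · dsimp only
      rw [hinner.2]
  have K := (pvFoldlSim (fun bd => bd = (b0::b1::b2::b3::b4::b5::b6::b7::rest)) (fun (st : List Int × List Int × Int) col =>
      let orig := PySem.List.pyGetD st.1 col 0
      let st2 := (PySem.List.pyRange 0 8 1).foldl (fun (st : List Int × List Int × Int) row =>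
          if row = orig then st
          else
            let bd := PySem.List.pySetD st.1 col row
            let h := heuristic bd
            (bd, if h < st.2.2 then (PySem.List.slice bd none none, h) else (st.2.1, st.2.2))) st
      (PySem.List.pySetD st2.1 col orig, st2.2)) (fun (st : List Int × Int) col =>
      let orig := PySem.List.pyGetD (b0::b1::b2::b3::b4::b5::b6::b7::rest) col 0
      let cur := pvColContrib (b0::b1::b2::b3::b4::b5::b6::b7::rest) col orig
      (PySem.List.pyRange 0 8 1).foldl (fun (st : List Int × Int) row =>
          if row = orig then st
          else
            let h := pvBase (b0::b1::b2::b3::b4::b5::b6::b7::rest) - cur + pvColContrib (b0::b1::b2::b3::b4::b5::b6::b7::rest) col row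
            if h < st.2 then
              (PySem.List.slice (b0::b1::b2::b3::b4::b5::b6::b7::rest) none (some col) ++ [row] ++ PySem.List.slice (b0::b1::b2::b3::b4::b5::b6::b7::rest) (some (col + 1)) none, h)
            else st) st)
    (PySem.List.pyRange 0 8 1) hstep
    ((b0::b1::b2::b3::b4::b5::b6::b7::rest), (PySem.List.slice (b0::b1::b2::b3::b4::b5::b6::b7::rest) none none, pvBase (b0::b1::b2::b3::b4::b5::b6::b7::rest))) rfl).2
  dsimp only at K ⊢
  unfold best_neighbor best_neighbor_alt
  rw [heu_eq_base]
  dsimp only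
  rw [K]
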